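-- pv_equiv track=rewrite | github.com/scikit-bio/scikit-bio | skbio/io/format/genbank.py | _serialize_reference
-- ===== SOURCE A (Python) =====
-- def _serialize_reference(header, obj, indent=12):
--     '''Serialize REFERENCE.
--
--     Parameters
--     ----------
--     obj : list
--     '''
--     padding = '  '
--     sort_order = {'REFERENCE': 0, 'AUTHORS': 1,
--                   'TITLE': 2, 'JOURNAL': 3, 'PUBMED': 4}
--     for obj_i in obj:
--         ref_i = []
--         for h in sorted(obj_i, key=lambda k: sort_order.get(k, 100)):
--             if h == header:
--                 s = '{h:<{indent}}{ref}'.format(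
--                     h=h, indent=indent, ref=obj_i[h])
--             else:
--                 s = '{h:<{indent}}{value}'.format(
--                     h=padding + h, indent=indent, value=obj_i[h])
--             ref_i.append(s)
--         yield '%s\n' % '\n'.join(ref_i)
-- ===== SOURCE B (Python) =====
-- def _serialize_reference(header, obj, indent=12):
--     """Serialize REFERENCE entries: fixed-priority table traversal instead of a sort."""
--     padding = '  '
--     names = ('REFERENCE', 'AUTHORS', 'TITLE', 'JOURNAL', 'PUBMED')
--
--     def line(h, v):
--         label = h if h == header else padding + h
--         return label + ' ' * (indent - len(label)) + v
--
--     for obj_i in obj: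
--         parts = [line(n, obj_i[n]) for n in names if n in obj_i]
--         parts += [line(h, v) for h, v in obj_i.items() if h not in names]
--         yield '\n'.join(parts) + '\n'
-- ===== Notes on version B (the rewrite author's own statement) =====
-- stated objective: alternative
-- what changed: Replaces the stable sort by a priority dict (sorted(..., key=sort_order.get)) with two plain passes: first emit the five priority names that occur in the dict in fixed table order, then emit the remaining items in dict insertion order; padding is built by string concatenation with ' '*(indent-len(label)) instead of a format-spec width.
-- crash fix: On indent < 0 with at least one non-empty reference dict, A raises ValueError ('Sign not allowed in string format specifier'); B's ' '*(negative) is empty, so B returns the unpadded lines. — e.g. on _serialize_reference("REFERENCE", [[("REFERENCE", "1")]], -1): A raises ValueError, B returns ["REFERENCE1\n"]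
import Mathlib
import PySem

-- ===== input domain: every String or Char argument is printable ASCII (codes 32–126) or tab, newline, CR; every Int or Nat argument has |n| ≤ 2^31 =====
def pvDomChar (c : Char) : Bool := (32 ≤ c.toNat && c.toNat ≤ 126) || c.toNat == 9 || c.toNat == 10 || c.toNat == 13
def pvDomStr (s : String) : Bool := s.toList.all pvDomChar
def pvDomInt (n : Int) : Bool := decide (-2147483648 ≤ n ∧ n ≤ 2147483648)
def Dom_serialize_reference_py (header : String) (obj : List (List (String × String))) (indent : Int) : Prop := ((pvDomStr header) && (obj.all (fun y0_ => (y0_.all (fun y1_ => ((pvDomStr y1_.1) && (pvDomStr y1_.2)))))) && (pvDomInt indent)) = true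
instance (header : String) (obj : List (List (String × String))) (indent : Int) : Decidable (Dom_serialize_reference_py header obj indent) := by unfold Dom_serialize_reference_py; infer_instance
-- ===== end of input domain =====

-- B replaces the stable sort by priority with two plain passes (priority names in fixed table order,
-- then remaining items in insertion order); same output, and B returns (unpadded) where A's negative
-- format width raises ValueError (excluded by Pre_, documented in Raises_).


-- ===== PORT A =====
-- '{h:<{indent}}{ref}': left-justify the label to width indent with spaces, then the value; exact over List Char.
def pvFmtLine (header : String) (indent : Int) (value : String) (h : String) : List Char :=
  let label : List Char := if h == header then h.toList else ' ' :: ' ' :: h.toList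
  label ++ List.replicate (indent - (label.length : Int)).toNat ' ' ++ value.toList

-- sort_order.get(k, 100)
def pvSortKey (k : String) : Int :=
  (PySem.Dict.ofList [("REFERENCE", (0 : Int)), ("AUTHORS", 1), ("TITLE", 2),
                      ("JOURNAL", 3), ("PUBMED", 4)]).getD k 100

def serialize_reference_py (header : String) (obj : List (List (String × String))) (indent : Int) : List String :=
  obj.map (fun obj_i =>
    let d := PySem.Dict.ofList obj_i
    let ref_i := (PySem.List.sorted d.keys pvSortKey false).map
      (fun h => String.mk (pvFmtLine header indent (d.getD h "") h))
    String.mk (PySem.Chars.join ['\n'] (ref_i.map String.toList) ++ ['\n']))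

-- ===== PORT B =====
def pvNames : List String := ["REFERENCE", "AUTHORS", "TITLE", "JOURNAL", "PUBMED"]

-- label + ' ' * (indent - len(label)) + v  (a negative repetition count is the empty string)
def pvLineC (header : String) (indent : Int) (h v : String) : List Char :=
  let label : List Char := if h == header then h.toList else ' ' :: ' ' :: h.toList
  label ++ List.replicate (indent - (label.length : Int)).toNat ' ' ++ v.toList

-- first pass: the priority names present in the dict, in table order
def pvPrioLines (header : String) (indent : Int) (d : PySem.Dict String String) : List String → List (List Char)
  | [] => []
  | n :: ns =>
    if d.contains n then pvLineC header indent n (d.getD n "") :: pvPrioLines header indent d ns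
    else pvPrioLines header indent d ns

-- second pass: remaining items in insertion order
def pvRestLines (header : String) (indent : Int) : List (String × String) → List (List Char)
  | [] => []
  | (h, v) :: ps =>
    if pvNames.contains h then pvRestLines header indent ps
    else pvLineC header indent h v :: pvRestLines header indent ps

-- '\n'.join(parts) + '\n'
def pvJoinNL : List (List Char) → List Char
  | [] => ['\n']
  | [s] => s ++ ['\n']
  | s :: t :: ss => s ++ '\n' :: pvJoinNL (t :: ss)

def pvSerRefs (header : String) (indent : Int) : List (List (String × String)) → List String
  | [] => []
  | obj_i :: rest =>
    let d := PySem.Dict.ofList obj_i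
    String.mk (pvJoinNL (pvPrioLines header indent d pvNames ++ pvRestLines header indent d.items))
      :: pvSerRefs header indent rest

def serialize_reference_py_alt (header : String) (obj : List (List (String × String))) (indent : Int) : List String :=
  pvSerRefs header indent obj

-- ===== PRECONDITION & SPEC =====
-- A raises ValueError on a negative indent as soon as one reference dict is non-empty
-- (the format spec '{h:<{indent}}' rejects a negative width); those inputs are excluded.
def Pre_serialize_reference_py (header : String) (obj : List (List (String × String))) (indent : Int) : Prop :=
  0 ≤ indent ∨ obj.all List.isEmpty = true
instance (header : String) (obj : List (List (String × String))) (indent : Int) : Decidable (Pre_serialize_reference_py header obj indent) := by unfold Pre_serialize_reference_py; infer_instance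

def pvWitness_serialize_reference_py : String × (List (List (String × String))) × Int :=
  ("REFERENCE", [[("AUTHORS", "a"), ("REFERENCE", "1")], [("X", "y")]], 12)

-- On indent < 0 with at least one non-empty reference dict, A raises ValueError; B's
-- ' ' * (negative count) is empty, so B returns the unpadded lines.
def Raises_serialize_reference_py (header : String) (obj : List (List (String × String))) (indent : Int) : Prop :=
  indent < 0 ∧ ¬ (obj.all List.isEmpty = true)
instance (header : String) (obj : List (List (String × String))) (indent : Int) : Decidable (Raises_serialize_reference_py header obj indent) := by unfold Raises_serialize_reference_py; infer_instance
def pvRaiseWitness_serialize_reference_py : String × (List (List (String × String))) × Int :=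
  ("REFERENCE", [[("REFERENCE", "1")]], -1)
def pvRaiseWitnessOut_serialize_reference_py : List String := ["REFERENCE1\n"]

def Spec_serialize_reference_py (header : String) (obj : List (List (String × String))) (indent : Int) (out : List String) : Prop := out = serialize_reference_py_alt header obj indent
instance (header : String) (obj : List (List (String × String))) (indent : Int) (out : List String) : Decidable (Spec_serialize_reference_py header obj indent out) := by unfold Spec_serialize_reference_py; infer_instance

-- ===== CLAIM (what is proved, stated in full; the proofs are below) =====
def Claim_equal_serialize_reference_py : Prop := ∀ (header : String) (obj : List (List (String × String))) (indent : Int), Dom_serialize_reference_py header obj indent → Pre_serialize_reference_py header obj indent → Spec_serialize_reference_py header obj indent (serialize_reference_py header obj indent)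

def Claim_raises_serialize_reference_py : Prop := (∀ (header : String) (obj : List (List (String × String))) (indent : Int), Dom_serialize_reference_py header obj indent → Raises_serialize_reference_py header obj indent → ¬ Pre_serialize_reference_py header obj indent) ∧ (Dom_serialize_reference_py (pvRaiseWitness_serialize_reference_py.1) (pvRaiseWitness_serialize_reference_py.2.1) (pvRaiseWitness_serialize_reference_py.2.2) ∧ Raises_serialize_reference_py (pvRaiseWitness_serialize_reference_py.1) (pvRaiseWitness_serialize_reference_py.2.1) (pvRaiseWitness_serialize_reference_py.2.2) ∧ serialize_reference_py_alt (pvRaiseWitness_serialize_reference_py.1) (pvRaiseWitness_serialize_reference_py.2.1) (pvRaiseWitness_serialize_reference_py.2.2) = pvRaiseWitnessOut_serialize_reference_py)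

-- ===== LEMMAS AND PROOFS =====

-- pvSortKey as an if-chain
theorem pvSortKey_eq (k : String) :
    pvSortKey k = if k = "REFERENCE" then 0 else if k = "AUTHORS" then 1 else
      if k = "TITLE" then 2 else if k = "JOURNAL" then 3 else if k = "PUBMED" then 4 else (100 : Int) := by
  have hd : PySem.Dict.ofList [("REFERENCE", (0 : Int)), ("AUTHORS", 1), ("TITLE", 2), ("JOURNAL", 3), ("PUBMED", 4)]
      = PySem.Dict.mk [("REFERENCE", (0 : Int)), ("AUTHORS", 1), ("TITLE", 2), ("JOURNAL", 3), ("PUBMED", 4)] := by decide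
  unfold pvSortKey
  rw [hd, PySem.Dict.getD_eq_get?_getD]
  split_ifs with h1 h2 h3 h4 h5
  · subst h1; decide
  · subst h2; decide
  · subst h3; decide
  · subst h4; decide
  · subst h5; decide
  · simp [PySem.Dict.get?_mk_cons, PySem.Dict.get?,
      Ne.symm h1, Ne.symm h2, Ne.symm h3, Ne.symm h4, Ne.symm h5]

theorem pvSortKey_mem (k : String) : pvSortKey k ∈ ([0, 1, 2, 3, 4, 100] : List Int) := by
  rw [pvSortKey_eq]; split_ifs <;> simp

theorem insertBy_skip {α : Type} (before : α → α → Bool) (x : α) (B rest : List α)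
    (h : ∀ y ∈ B, before x y = false) :
    PySem.List.insertBy before x (B ++ rest) = B ++ PySem.List.insertBy before x rest := by
  induction B with
  | nil => simp
  | cons b bs ih =>
    have hb : before x b = false := h b (by simp)
    simp [PySem.List.insertBy, hb, ih (fun y hy => h y (by simp [hy]))]

theorem insertBy_front {α : Type} (before : α → α → Bool) (x : α) (rest : List α)
    (h : ∀ y ∈ rest, before x y = true) :
    PySem.List.insertBy before x rest = x :: rest := by
  cases rest with
  | nil => simp [PySem.List.insertBy]
  | cons r rs => simp [PySem.List.insertBy, h r (by simp)]

-- stable insertion of x into a bucket-decomposed list appends x at the end of its bucket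
theorem insertBy_buckets {α : Type} (key : α → Int) (ps : List Int) (hps : ps.Pairwise (· < ·))
    (x : α) (hx : key x ∈ ps) (ks : List α) :
    PySem.List.insertBy (fun a b => decide (key a < key b)) x
        (ps.flatMap (fun p => ks.filter (fun k => key k == p)))
      = ps.flatMap (fun p => (ks ++ [x]).filter (fun k => key k == p)) := by
  induction ps with
  | nil => simp at hx
  | cons p ps' ih =>
    have hlt : ∀ q ∈ ps', p < q := (List.pairwise_cons.mp hps).1
    simp only [List.flatMap_cons]
    by_cases hxp : key x = p
    · -- x belongs to the first bucket: skip it, then insert in front of all later buckets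
      rw [insertBy_skip _ x _ _ (by
        intro y hy
        have : key y = p := by simpa using (List.mem_filter.mp hy).2
        simp [this, hxp])]
      rw [insertBy_front _ x _ (by
        intro y hy
        simp only [List.mem_flatMap, List.mem_filter] at hy
        obtain ⟨q, hq, _, hkey⟩ := hy
        have : key y = q := by simpa using hkey
        simp [this, hxp]
        exact hlt q hq)]
      have h1 : (ks ++ [x]).filter (fun k => key k == p) = ks.filter (fun k => key k == p) ++ [x] := by
        simp [List.filter_append, hxp]
      have h2 : ps'.flatMap (fun q => (ks ++ [x]).filter (fun k => key k == q))
          = ps'.flatMap (fun q => ks.filter (fun k => key k == q)) := by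
        apply List.flatMap_congr
        intro q hq
        have : key x ≠ q := by
          have := hlt q hq; omega
        simp [List.filter_append, this]
      rw [h1, h2]; simp
    · have hx' : key x ∈ ps' := by
        rcases List.mem_cons.mp hx with h | h
        · exact absurd h hxp
        · exact h
      have hgt : p < key x := hlt _ hx'
      rw [insertBy_skip _ x _ _ (by
        intro y hy
        have : key y = p := by simpa using (List.mem_filter.mp hy).2
        simp [this]; omega)]
      rw [ih (List.pairwise_cons.mp hps).2 hx']
      have : (ks ++ [x]).filter (fun k => key k == p) = ks.filter (fun k => key k == p) := by
        simp [List.filter_append]; omega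
      rw [this]

theorem sorted_buckets {α : Type} (key : α → Int) (ps : List Int) (hps : ps.Pairwise (· < ·))
    (hall : ∀ x : α, key x ∈ ps) (ks : List α) :
    PySem.List.sorted ks key false = ps.flatMap (fun p => ks.filter (fun k => key k == p)) := by
  induction ks using List.reverseRecOn with
  | nil => simp [PySem.List.sorted]
  | append_singleton ks x ih =>
    rw [PySem.List.sorted_eq_foldl_insertBy, List.foldl_append] at *
    simp only [List.foldl_cons, List.foldl_nil]
    rw [ih, insertBy_buckets key ps hps x (hall x) ks]

-- single-name bucket: for a Nodup list, filter (· == a) is [a] if present else []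
theorem filter_eq_single {α : Type} [DecidableEq α] (ks : List α) (hnd : ks.Nodup) (a : α) :
    ks.filter (fun k => k == a) = if a ∈ ks then [a] else [] := by
  induction ks with
  | nil => simp
  | cons b bs ih =>
    rcases List.nodup_cons.mp hnd with ⟨hb, hbs⟩
    by_cases hba : b = a
    · subst hba
      simp [List.filter_cons, hb, ih hbs]
    · simp [List.filter_cons, hba, ih hbs, Ne.symm hba]

-- pointwise: key k == i  ↔  k == name_i   (and key k == 100 ↔ k not a priority name)
theorem bucket_is_name (ks : List String) (i : Int) (name : String)
    (hin : (name, i) ∈ [(("REFERENCE" : String), (0 : Int)), ("AUTHORS", 1), ("TITLE", 2), ("JOURNAL", 3), ("PUBMED", 4)]) :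
    ks.filter (fun k => pvSortKey k == i) = ks.filter (fun k => k == name) := by
  apply List.filter_congr
  intro k _
  rw [pvSortKey_eq]
  fin_cases hin <;> (split_ifs with h1 h2 h3 h4 h5 <;> simp_all) <;> decide

theorem bucket_100 (ks : List String) :
    ks.filter (fun k => pvSortKey k == 100) = ks.filter (fun k => !pvNames.contains k) := by
  apply List.filter_congr
  intro k _
  rw [pvSortKey_eq]
  split_ifs with h1 h2 h3 h4 h5 <;> simp_all [pvNames]

-- the heart of the equivalence: the stable sort by priority equals the fixed-order traversal
theorem key_order (ks : List String) (hnd : ks.Nodup) :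
    PySem.List.sorted ks pvSortKey false
      = pvNames.filter (fun n => decide (n ∈ ks)) ++ ks.filter (fun k => !pvNames.contains k) := by
  rw [sorted_buckets pvSortKey [0, 1, 2, 3, 4, 100] (by decide) pvSortKey_mem ks]
  simp only [List.flatMap_cons, List.flatMap_nil, List.append_nil]
  rw [bucket_is_name ks 0 "REFERENCE" (by decide), bucket_is_name ks 1 "AUTHORS" (by decide),
      bucket_is_name ks 2 "TITLE" (by decide), bucket_is_name ks 3 "JOURNAL" (by decide),
      bucket_is_name ks 4 "PUBMED" (by decide), bucket_100 ks]
  rw [filter_eq_single ks hnd, filter_eq_single ks hnd, filter_eq_single ks hnd,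
      filter_eq_single ks hnd, filter_eq_single ks hnd]
  simp only [pvNames, List.filter_cons, List.filter_nil]
  by_cases h1 : ("REFERENCE" : String) ∈ ks <;> by_cases h2 : ("AUTHORS" : String) ∈ ks <;>
    by_cases h3 : ("TITLE" : String) ∈ ks <;> by_cases h4 : ("JOURNAL" : String) ∈ ks <;>
    by_cases h5 : ("PUBMED" : String) ∈ ks <;> simp [h1, h2, h3, h4, h5]

-- B's two line-building passes as filter+map over the same key list
theorem prioLines_eq (header : String) (indent : Int) (d : PySem.Dict String String) (ns : List String) :
    pvPrioLines header indent d ns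
      = (ns.filter (fun n => d.contains n)).map (fun h => pvLineC header indent h (d.getD h "")) := by
  induction ns with
  | nil => rfl
  | cons n ns ih =>
    by_cases hc : d.contains n = true <;> simp [pvPrioLines, hc, ih, List.filter_cons]

theorem restLines_eq (header : String) (indent : Int) (ps : List (String × String)) :
    pvRestLines header indent ps
      = (ps.filter (fun p => !pvNames.contains p.1)).map (fun p => pvLineC header indent p.1 p.2) := by
  induction ps with
  | nil => rfl
  | cons p ps ih =>
    obtain ⟨h, v⟩ := p
    by_cases hc : h ∈ pvNames <;> simp [pvRestLines, hc, ih, List.filter_cons]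

theorem joinNL_eq (ls : List (List Char)) :
    pvJoinNL ls = PySem.Chars.join ['\n'] ls ++ ['\n'] := by
  induction ls with
  | nil => rfl
  | cons s ss ih =>
    cases ss with
    | nil => simp [pvJoinNL, PySem.Chars.join, List.intercalate]
    | cons t ts =>
      rw [pvJoinNL, ih]
      simp [PySem.Chars.join, List.intercalate, List.intersperse]

-- one reference entry: A's sorted-and-formatted block equals B's two-pass block
theorem toList_mk (l : List Char) : (String.mk l).toList = l := String.toList_ofList

theorem ref_eq (header : String) (indent : Int) (obj_i : List (String × String)) :
    String.mk (PySem.Chars.join ['\n']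
        (((PySem.List.sorted (PySem.Dict.ofList obj_i).keys pvSortKey false).map
          (fun h => String.mk (pvFmtLine header indent ((PySem.Dict.ofList obj_i).getD h "") h))).map
            String.toList) ++ ['\n'])
      = String.mk (pvJoinNL (pvPrioLines header indent (PySem.Dict.ofList obj_i) pvNames
          ++ pvRestLines header indent (PySem.Dict.ofList obj_i).items)) := by
  have hnd := PySem.Dict.nodup_keys_ofList obj_i
  have hfc : List.filter (fun n => decide (n ∈ (PySem.Dict.ofList obj_i).keys)) pvNames
      = List.filter (fun n => (PySem.Dict.ofList obj_i).contains n) pvNames :=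
    List.filter_congr (fun n _ => by rw [PySem.Dict.contains_eq_decide_mem_keys])
  rw [joinNL_eq, prioLines_eq, restLines_eq,
      PySem.Dict.items_eq_map_keys (PySem.Dict.ofList obj_i) hnd "",
      key_order (PySem.Dict.ofList obj_i).keys hnd]
  congr 2
  simp only [List.map_append, List.map_map, List.filter_map, Function.comp_def]
  rw [hfc]
  simp [toList_mk, pvFmtLine, pvLineC]

-- unconditional equality of the two ports
theorem ports_eq (header : String) (obj : List (List (String × String))) (indent : Int) :
    serialize_reference_py header obj indent = serialize_reference_py_alt header obj indent := by
  unfold serialize_reference_py serialize_reference_py_alt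
  induction obj with
  | nil => rfl
  | cons obj_i rest ih =>
    rw [pvSerRefs, List.map_cons, ih]
    exact congrArg (· :: _) (ref_eq header indent obj_i)

-- ===== VERDICT (by name: the statement is the Claim_ definition above) =====
theorem serialize_reference_py_spec : Claim_equal_serialize_reference_py := by
  intro header obj indent _ _
  exact ports_eq header obj indent

theorem serialize_reference_py_raises : Claim_raises_serialize_reference_py := by
  unfold Claim_raises_serialize_reference_py
  exact ⟨by
    intro header obj indent _ hr hp
    rcases hr with ⟨h1, h2⟩
    rcases hp with h | h
    · omega
    · exact h2 h, by decide⟩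

-- self-check: the raise-witness value claimed in Claim_raises_ is exactly what B's port returns there
theorem pvRaiseWitness_ok :
    serialize_reference_py_alt (pvRaiseWitness_serialize_reference_py.1)
      (pvRaiseWitness_serialize_reference_py.2.1) (pvRaiseWitness_serialize_reference_py.2.2)
      = pvRaiseWitnessOut_serialize_reference_py :=
  serialize_reference_py_raises.2.2.2
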